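-- pv_equiv track=rewrite | github.com/gvarun20/TDDD95 | Exercise 1/ljutnja.py | find_optimal_distribution
-- ===== SOURCE A (Python) =====
-- def find_optimal_distribution(total_supply: int, demand_list: list[int]) -> int:
--     left_bound = 0
--     right_bound = 2000000000
--
--     sorted_demands = sorted(demand_list)
--
--
--     while left_bound < right_bound:
--
--
--         mid_point = (left_bound + right_bound) // 2
--         resources_needed = sum([max(0, req - mid_point) for req in sorted_demands])
--
--
--
--
--         if resources_needed > total_supply:
--
--             left_bound = mid_point + 1
--         else:
--             right_bound = mid_point
--
--     threshold_value = left_bound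
--     remaining_resources = total_supply
--     deficit_array = [x for x in sorted_demands]
--
--
--     for i in range(len(deficit_array)):
--
--
--
--
--         current_deficit = min(deficit_array[i], threshold_value)
--         allocation = deficit_array[i] - current_deficit
--         remaining_resources -= allocation
--         deficit_array[i] = current_deficit
--
--
--     for i in range(len(deficit_array) - 1, -1, -1):
--
--
--
--         if remaining_resources <= 0:
--             break
--         deficit_array[i] = max(0, deficit_array[i] - 1)
--
--
--
--
--         remaining_resources -= 1
--
--     return sum([x * x for x in deficit_array])
-- ===== SOURCE B (Python) =====
-- def find_optimal_distribution(total_supply: int, demand_list: list[int]) -> int: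
--     s = sorted(demand_list)
--     n = len(s)
--     pre = [0]
--     acc = 0
--     for v in s:
--         acc += v
--         pre.append(acc)
--
--     def needed(t):
--         # smallest index lo with s[lo] > t (n if none), by binary search
--         lo, hi = 0, n
--         while lo < hi:
--             m = (lo + hi) // 2
--             if s[m] > t:
--                 hi = m
--             else:
--                 lo = m + 1
--         return (pre[n] - pre[lo]) - (n - lo) * t
--
--     lo, hi = 0, 2000000000
--     while lo < hi:
--         m = (lo + hi) // 2
--         if needed(m) > total_supply:
--             lo = m + 1
--         else:
--             hi = m
--     threshold = lo
--     remaining = total_supply - needed(threshold)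
--     k = min(n, max(0, remaining))
--     head = s[:n - k]
--     tail = s[n - k:]
--     return sum(min(x, threshold) ** 2 for x in head) \
--          + sum(max(0, min(x, threshold) - 1) ** 2 for x in tail)
-- ===== Notes on version B (the rewrite author's own statement) =====
-- stated objective: faster
-- what changed: B evaluates the binary-search threshold in O(log n) per probe via prefix sums plus an inner lower-bound binary search on the sorted array (instead of A's O(n) full re-summation per probe), and assembles the final sum of squares in closed form from two slices instead of A's two index-mutation passes over the deficit array.
import Mathlib
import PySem

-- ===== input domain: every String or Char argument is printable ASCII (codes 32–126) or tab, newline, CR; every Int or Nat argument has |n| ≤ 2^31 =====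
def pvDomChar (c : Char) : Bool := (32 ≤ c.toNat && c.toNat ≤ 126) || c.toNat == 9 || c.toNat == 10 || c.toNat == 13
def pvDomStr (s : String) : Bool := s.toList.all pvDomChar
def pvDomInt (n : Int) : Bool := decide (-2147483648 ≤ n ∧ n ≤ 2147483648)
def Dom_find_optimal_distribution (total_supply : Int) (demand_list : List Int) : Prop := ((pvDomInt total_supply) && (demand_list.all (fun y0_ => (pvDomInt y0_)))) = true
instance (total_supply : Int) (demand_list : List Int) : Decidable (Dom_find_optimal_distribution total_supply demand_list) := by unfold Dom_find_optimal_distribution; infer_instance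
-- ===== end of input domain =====

-- B replaces A's O(n)-per-step evaluation of the binary-search threshold by prefix sums plus an
-- inner binary search on the sorted array, and replaces A's two mutation passes by a closed-form
-- assembly from slices; objective: faster (constant-factor, measured).

-- ===== PORT A =====
-- resources_needed = sum([max(0, req - mid_point) for req in sorted_demands])
def pvNeedA (d : List Int) (m : Int) : Int :=
  (d.map (fun req => max 0 (req - m))).sum

-- the `while left_bound < right_bound` binary search of A
def pvBsA (d : List Int) (ts : Int) (lo hi : Int) : Int :=
  if h : lo < hi then
    let m := PySem.Int.floordiv (lo + hi) 2
    if pvNeedA d m > ts then pvBsA d ts (m + 1) hi else pvBsA d ts lo m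
  else lo
termination_by (hi - lo).toNat
decreasing_by
  all_goals
    have h2 : lo ≤ m ∧ m ≤ hi := PySem.Int.floordiv_two_mid_bounds (le_of_lt h)
    have h3 : m < hi := by
      have := (PySem.Int.floordiv_lt_iff_lt_mul (a := lo + hi) (b := 2) (q := hi) (by norm_num)).2
      exact this (by omega)
    omega

-- first `for i in range(len(deficit_array))` loop body of A
def pvStep1 (T : Int) (st : Int × List Int) (i : Int) : Int × List Int :=
  let cur := min (PySem.List.pyGetD st.2 i 0) T
  let alloc := PySem.List.pyGetD st.2 i 0 - cur
  (st.1 - alloc, PySem.List.pySetD st.2 i cur)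

-- second loop of A, `for i in range(len-1, -1, -1)` with the `break`
def pvLoop2 : List Int → Int → List Int → Int × List Int
  | [], rem, arr => (rem, arr)
  | i :: rest, rem, arr =>
    if rem ≤ 0 then (rem, arr)
    else pvLoop2 rest (rem - 1)
          (PySem.List.pySetD arr i (max 0 (PySem.List.pyGetD arr i 0 - 1)))

def find_optimal_distribution (total_supply : Int) (demand_list : List Int) : Int :=
  let sorted_demands := PySem.List.sorted demand_list (fun x => x) false
  let threshold_value := pvBsA sorted_demands total_supply 0 2000000000
  let deficit_array := sorted_demands.map (fun x => x)
  let st := (PySem.List.pyRange 0 (PySem.List.len deficit_array) 1).foldl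
              (pvStep1 threshold_value) (total_supply, deficit_array)
  let st2 := pvLoop2 (PySem.List.pyRange (PySem.List.len st.2 - 1) (-1) (-1)) st.1 st.2
  (st2.2.map (fun x => x * x)).sum

-- ===== PORT B =====
-- hand-written lower-bound binary search of Source B: first index lo with s[lo] > t
def pvLbs (s : List Int) (t : Int) (lo hi : Int) : Int :=
  if h : lo < hi then
    let m := PySem.Int.floordiv (lo + hi) 2
    if PySem.List.pyGetD s m 0 > t then pvLbs s t lo m else pvLbs s t (m + 1) hi
  else lo
termination_by (hi - lo).toNat
decreasing_by
  all_goals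
    have h2 : lo ≤ m ∧ m ≤ hi := PySem.Int.floordiv_two_mid_bounds (le_of_lt h)
    have h3 : m < hi := by
      have := (PySem.Int.floordiv_lt_iff_lt_mul (a := lo + hi) (b := 2) (q := hi) (by norm_num)).2
      exact this (by omega)
    omega

-- needed(t) of Source B: suffix sum via prefix sums minus count * t
def pvNeedB (s pre : List Int) (n t : Int) : Int :=
  let lo := pvLbs s t 0 n
  (PySem.List.pyGetD pre n 0 - PySem.List.pyGetD pre lo 0) - (n - lo) * t

-- outer binary search of Source B
def pvBsB (s pre : List Int) (n ts : Int) (lo hi : Int) : Int :=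
  if h : lo < hi then
    let m := PySem.Int.floordiv (lo + hi) 2
    if pvNeedB s pre n m > ts then pvBsB s pre n ts (m + 1) hi else pvBsB s pre n ts lo m
  else lo
termination_by (hi - lo).toNat
decreasing_by
  all_goals
    have h2 : lo ≤ m ∧ m ≤ hi := PySem.Int.floordiv_two_mid_bounds (le_of_lt h)
    have h3 : m < hi := by
      have := (PySem.Int.floordiv_lt_iff_lt_mul (a := lo + hi) (b := 2) (q := hi) (by norm_num)).2
      exact this (by omega)
    omega

def find_optimal_distribution_alt (total_supply : Int) (demand_list : List Int) : Int :=
  let s := PySem.List.sorted demand_list (fun x => x) false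
  let n := PySem.List.len s
  let pre := (s.foldl (fun (st : List Int × Int) v => (st.1 ++ [st.2 + v], st.2 + v)) ([0], 0)).1
  let threshold := pvBsB s pre n total_supply 0 2000000000
  let remaining := total_supply - pvNeedB s pre n threshold
  let k := min n (max 0 remaining)
  let head := PySem.List.slice s none (some (n - k))
  let tail := PySem.List.slice s (some (n - k)) none
  (head.map (fun x => (min x threshold) ^ 2)).sum
    + (tail.map (fun x => (max 0 (min x threshold - 1)) ^ 2)).sum

-- ===== PRECONDITION & SPEC =====
def Spec_find_optimal_distribution (total_supply : Int) (demand_list : List Int) (out : Int) : Prop := out = find_optimal_distribution_alt total_supply demand_list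
instance (total_supply : Int) (demand_list : List Int) (out : Int) : Decidable (Spec_find_optimal_distribution total_supply demand_list out) := by unfold Spec_find_optimal_distribution; infer_instance

-- ===== CLAIM (what is proved, stated in full; the proofs are below) =====
def Claim_equal_find_optimal_distribution : Prop := ∀ (total_supply : Int) (demand_list : List Int), Dom_find_optimal_distribution total_supply demand_list → Spec_find_optimal_distribution total_supply demand_list (find_optimal_distribution total_supply demand_list)

-- ===== LEMMAS AND PROOFS =====

def pvPsums (a : Int) : List Int → List Int
  | [] => []
  | v :: r => (a + v) :: pvPsums (a + v) r

lemma pvPre_fold (s : List Int) : ∀ (L : List Int) (a : Int),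
    (s.foldl (fun (st : List Int × Int) v => (st.1 ++ [st.2 + v], st.2 + v)) (L, a)).1
      = L ++ pvPsums a s := by
  induction s with
  | nil => simp [pvPsums]
  | cons v r ih =>
      intro L a
      simp only [List.foldl_cons, pvPsums]
      rw [ih]
      simp

lemma pvPsums_getD (s : List Int) : ∀ (a : Int) (i : Nat), i ≤ s.length →
    (a :: pvPsums a s).getD i 0 = a + (s.take i).sum := by
  induction s with
  | nil =>
      intro a i h
      have hi : i = 0 := by simpa using h
      subst hi; simp
  | cons v r ih =>
      intro a i h
      cases i with
      | zero => simp
      | succ j =>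
          simp only [pvPsums, List.getD_cons_succ, List.take_succ_cons, List.sum_cons]
          rw [ih (a + v) j (by simpa using h)]
          ring

lemma pvLbs_spec_aux (s : List Int) (hs : s.Pairwise (· ≤ ·)) (t : Int) :
    ∀ (fuel : Nat) (lo hi : Int), (hi - lo).toNat ≤ fuel → 0 ≤ lo → lo ≤ hi → hi ≤ (s.length : Int) →
    (∀ j : Nat, (j : Int) < lo → s.getD j 0 ≤ t) →
    (∀ j : Nat, hi ≤ (j : Int) → j < s.length → t < s.getD j 0) →
    0 ≤ pvLbs s t lo hi ∧ pvLbs s t lo hi ≤ (s.length : Int) ∧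
      (∀ j : Nat, (j : Int) < pvLbs s t lo hi → s.getD j 0 ≤ t) ∧
      (∀ j : Nat, pvLbs s t lo hi ≤ (j : Int) → j < s.length → t < s.getD j 0) := by
  have hmono : ∀ i j : Nat, i ≤ j → j < s.length → s.getD i 0 ≤ s.getD j 0 := by
    intro i j hij hj
    rcases Nat.eq_or_lt_of_le hij with rfl | hlt
    · exact le_refl _
    · rw [List.getD_eq_getElem s 0 (lt_trans hlt hj), List.getD_eq_getElem s 0 hj]
      exact (List.pairwise_iff_getElem.mp hs) i j (lt_trans hlt hj) hj hlt
  intro fuel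
  induction fuel with
  | zero =>
      intro lo hi hf h0 hle hhi inv1 inv2
      have : hi = lo := by omega
      subst this
      rw [pvLbs]; simp only [lt_irrefl, dite_false]
      exact ⟨h0, hhi, inv1, fun j hj hjl => inv2 j hj hjl⟩
  | succ f ih =>
      intro lo hi hf h0 hle hhi inv1 inv2
      by_cases hlt : lo < hi
      · rw [pvLbs]
        simp only [hlt, dite_true]
        have h2 : lo ≤ PySem.Int.floordiv (lo + hi) 2 ∧ PySem.Int.floordiv (lo + hi) 2 ≤ hi :=
          PySem.Int.floordiv_two_mid_bounds (le_of_lt hlt)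
        have h3 : PySem.Int.floordiv (lo + hi) 2 < hi := by
          have := (PySem.Int.floordiv_lt_iff_lt_mul (a := lo + hi) (b := 2) (q := hi) (by norm_num)).2
          exact this (by omega)
        set m := PySem.Int.floordiv (lo + hi) 2 with hm
        have hm0 : 0 ≤ m := le_trans h0 h2.1
        have hmlen : m.toNat < s.length := by omega
        have hmc : (m.toNat : Int) = m := Int.toNat_of_nonneg hm0
        have hget : PySem.List.pyGetD s m 0 = s.getD m.toNat 0 := by
          rw [PySem.List.pyGetD_eq_getElem s (0:Int) hm0 (by omega)]
          rw [List.getD_eq_getElem s 0 hmlen]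
        by_cases hcmp : PySem.List.pyGetD s m 0 > t
        · simp only [hcmp, if_true]
          apply ih lo m (by omega) h0 h2.1 (by omega) inv1
          intro j hj hjl
          calc t < s.getD m.toNat 0 := by rw [← hget]; exact hcmp
            _ ≤ s.getD j 0 := hmono _ _ (by omega) hjl
        · simp only [hcmp, if_false]
          apply ih (m + 1) hi (by omega) (by omega) (by omega) hhi _ inv2
          intro j hj
          have hjm : j ≤ m.toNat := by omega
          calc s.getD j 0 ≤ s.getD m.toNat 0 := hmono _ _ hjm hmlen
            _ ≤ t := by rw [← hget]; exact not_lt.mp hcmp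
      · rw [pvLbs]; simp only [hlt, dite_false]
        have : hi = lo := by omega
        subst this
        exact ⟨h0, hhi, inv1, inv2⟩

lemma pvNeed_eq (s : List Int) (hs : s.Pairwise (· ≤ ·)) (t : Int) :
    pvNeedB s (0 :: pvPsums 0 s) (s.length : Int) t = pvNeedA s t := by
  obtain ⟨hr0, hrlen, hle, hgt⟩ :=
    pvLbs_spec_aux s hs t ((s.length : Int) - 0).toNat 0 (s.length : Int) (le_refl _)
      (by omega) (by omega) (le_refl _)
      (by intro j hj; omega)
      (by intro j hj hjl; omega)
  set r := pvLbs s t 0 (s.length : Int) with hrdef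
  have hrc : ((r.toNat : Int)) = r := Int.toNat_of_nonneg hr0
  have hgetn : PySem.List.pyGetD (0 :: pvPsums 0 s) (s.length : Int) 0 = s.sum := by
    have : ((s.length : Int)) = ((s.length : Nat) : Int) := rfl
    rw [PySem.List.pyGetD_natCast, pvPsums_getD s 0 s.length (le_refl _)]
    simp
  have hgetr : PySem.List.pyGetD (0 :: pvPsums 0 s) r 0 = (s.take r.toNat).sum := by
    rw [← hrc, PySem.List.pyGetD_natCast, pvPsums_getD s 0 r.toNat (by omega)]
    simp only [Int.toNat_natCast, zero_add]
  have htake : ((s.take r.toNat).map (fun req => max 0 (req - t))).sum = 0 := by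
    apply List.sum_eq_zero
    intro x hx
    simp only [List.mem_map] at hx
    obtain ⟨y, hy, rfl⟩ := hx
    obtain ⟨j, hjl, rfl⟩ := List.getElem_of_mem hy
    have hjlen : j < s.length := by simp [List.length_take] at hjl; omega
    rw [List.getElem_take]
    have : s[j] ≤ t := by
      have := hle j (by simp [List.length_take] at hjl; omega)
      rwa [List.getD_eq_getElem s 0 hjlen] at this
    omega
  have hdrop : ((s.drop r.toNat).map (fun req => max 0 (req - t))).sum
      = (s.drop r.toNat).sum - ((s.drop r.toNat).length : Int) * t := by
    have hcongr : (s.drop r.toNat).map (fun req => max 0 (req - t))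
        = (s.drop r.toNat).map (fun req => req + (-t)) := by
      apply List.map_congr_left
      intro x hx
      obtain ⟨j, hjl, rfl⟩ := List.getElem_of_mem hx
      rw [List.getElem_drop]
      have hjlen : r.toNat + j < s.length := by simp [List.length_drop] at hjl; omega
      have : t < s[r.toNat + j] := by
        have := hgt (r.toNat + j) (by omega) hjlen
        rwa [List.getD_eq_getElem s 0 hjlen] at this
      omega
    rw [hcongr, PySem.List.sum_map_add_int (s.drop r.toNat) (fun x => x) (fun _ => -t)]
    rw [PySem.List.sum_map_const_int]
    simp [mul_comm]
    ring
  have hA : pvNeedA s t = (s.drop r.toNat).sum - ((s.drop r.toNat).length : Int) * t := by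
    unfold pvNeedA
    conv_lhs => rw [← List.take_append_drop r.toNat s]
    rw [List.map_append, List.sum_append, htake, hdrop]
    ring
  have hsum : s.sum = (s.take r.toNat).sum + (s.drop r.toNat).sum := by
    conv_lhs => rw [← List.take_append_drop r.toNat s]
    rw [List.sum_append]
  have hlen : ((s.drop r.toNat).length : Int) = (s.length : Int) - r := by
    simp [List.length_drop]
    omega
  unfold pvNeedB
  show PySem.List.pyGetD (0 :: pvPsums 0 s) (s.length : Int) 0
      - PySem.List.pyGetD (0 :: pvPsums 0 s) r 0 - ((s.length : Int) - r) * t = pvNeedA s t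
  rw [hgetn, hgetr, hA, hlen, hsum]
  ring

lemma pvBs_eq (s pre : List Int) (n ts : Int)
    (h : ∀ m : Int, pvNeedB s pre n m = pvNeedA s m) :
    ∀ (fuel : Nat) (lo hi : Int), (hi - lo).toNat ≤ fuel →
      pvBsA s ts lo hi = pvBsB s pre n ts lo hi := by
  intro fuel
  induction fuel with
  | zero =>
      intro lo hi hf
      have hnl : ¬ lo < hi := by omega
      rw [pvBsA, pvBsB]
      simp [hnl]
  | succ f ih =>
      intro lo hi hf
      by_cases hlt : lo < hi
      · rw [pvBsA, pvBsB]
        simp only [hlt, dite_true]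
        have h2 := PySem.Int.floordiv_two_mid_bounds (le_of_lt hlt)
        have h3 : PySem.Int.floordiv (lo + hi) 2 < hi := by
          have := (PySem.Int.floordiv_lt_iff_lt_mul (a := lo + hi) (b := 2) (q := hi) (by norm_num)).2
          exact this (by omega)
        rw [h]
        by_cases hcmp : pvNeedA s (PySem.Int.floordiv (lo + hi) 2) > ts
        · simp only [hcmp, if_true]
          exact ih _ _ (by omega)
        · simp only [hcmp, if_false]
          exact ih _ _ (by omega)
      · rw [pvBsA, pvBsB]; simp [hlt]

lemma pvSet_append (l1 l2 : List Int) (a v : Int) :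
    (l1 ++ a :: l2).set l1.length v = l1 ++ v :: l2 := by
  induction l1 with
  | nil => simp
  | cons h tl ih => simp [ih]

lemma pvGetD_append (l1 l2 : List Int) (a : Int) :
    PySem.List.pyGetD (l1 ++ a :: l2) (l1.length : Int) 0 = a := by
  rw [PySem.List.pyGetD_natCast]
  rw [List.getD_eq_getElem?_getD, List.getElem?_append_right (le_refl _)]
  simp

lemma pvLoop1_spec (T : Int) : ∀ (suf pref : List Int) (r : Int),
    (PySem.List.pyRange (pref.length : Int) ((pref.length : Int) + (suf.length : Int)) 1).foldl
        (pvStep1 T) (r, pref ++ suf)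
      = (r - ((suf.map (fun x => max 0 (x - T))).sum), pref ++ suf.map (fun x => min x T)) := by
  intro suf
  induction suf with
  | nil =>
      intro pref r
      rw [PySem.List.pyRange_one_eq_nil (by simp)]
      simp
  | cons x rest ih =>
      intro pref r
      rw [PySem.List.pyRange_one_cons (by simp only [List.length_cons]; push_cast; omega)]
      rw [List.foldl_cons]
      have hstep : pvStep1 T (r, pref ++ x :: rest) (pref.length : Int)
          = (r - (x - min x T), (pref ++ [min x T]) ++ rest) := by
        unfold pvStep1
        simp only [pvGetD_append]
        rw [PySem.List.pySetD_natCast, pvSet_append]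
        simp
      rw [hstep]
      have harg : ((pref.length : Int) + 1) = (((pref ++ [min x T]).length : Int)) := by
        simp
      have harg2 : (pref.length : Int) + ((x :: rest).length : Int)
          = (((pref ++ [min x T]).length : Int)) + ((rest.length : Int)) := by
        simp
        omega
      rw [harg, harg2, ih (pref ++ [min x T]) (r - (x - min x T))]
      apply Prod.ext
      · simp only [List.map_cons, List.sum_cons]
        have : max 0 (x - T) = x - min x T := by omega
        rw [this]; ring
      · show pref ++ [min x T] ++ List.map (fun x => min x T) rest
            = pref ++ List.map (fun x => min x T) (x :: rest)
        simp

lemma pvLoop2_spec : ∀ (J : Nat) (arr : List Int) (rem : Int), J ≤ arr.length →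
    (pvLoop2 (PySem.List.pyRange ((J : Int) - 1) (-1) (-1)) rem arr).2
      = arr.take (J - min J rem.toNat)
        ++ ((arr.drop (J - min J rem.toNat)).take (min J rem.toNat)).map (fun x => max 0 (x - 1))
        ++ arr.drop J := by
  intro J
  induction J with
  | zero =>
      intro arr rem h
      rw [PySem.List.pyRange_neg_one_eq_nil (by omega)]
      simp [pvLoop2]
  | succ J ih =>
      intro arr rem h
      have hJlen : J < arr.length := by omega
      have hcast : ((J + 1 : Nat) : Int) - 1 = (J : Int) := by push_cast; omega
      rw [hcast, PySem.List.pyRange_neg_one_cons (by omega)]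
      by_cases hrem : rem ≤ 0
      · simp only [pvLoop2, hrem, if_true]
        have hk : min (J + 1) rem.toNat = 0 := by omega
        rw [hk]
        simp
      · simp only [pvLoop2, hrem, if_false]
        have hget : PySem.List.pyGetD arr (J : Int) 0 = arr[J] := by
          rw [PySem.List.pyGetD_natCast, List.getD_eq_getElem arr 0 hJlen]
        have hset : PySem.List.pySetD arr (J : Int) (max 0 (PySem.List.pyGetD arr (J : Int) 0 - 1))
            = arr.take J ++ (max 0 (arr[J] - 1)) :: arr.drop (J + 1) := by
          rw [hget, PySem.List.pySetD_natCast, List.set_eq_take_append_cons_drop]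
          simp [hJlen]
        rw [hset]
        set f : Int → Int := fun x => max 0 (x - 1) with hf
        set arr' := arr.take J ++ f arr[J] :: arr.drop (J + 1) with harr'
        have hlen' : arr'.length = arr.length := by
          simp [harr', List.length_take, List.length_drop]
          omega
        rw [ih arr' (rem - 1) (by omega)]
        set k' := min J (rem - 1).toNat with hk'
        have hkk : min (J + 1) rem.toNat = k' + 1 := by omega
        have hk'le : k' ≤ J := by omega
        rw [hkk]
        -- component identities
        have htk : arr'.take (J - k') = arr.take (J - k') := by
          rw [harr']
          rw [List.take_append_of_le_length (by simp [List.length_take]; omega)]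
          rw [List.take_take]
          congr 1
          omega
        have hdrJ : arr'.drop J = f arr[J] :: arr.drop (J + 1) := by
          rw [harr', List.drop_append_of_le_length (by simp [List.length_take]; omega)]
          rw [List.drop_take]
          simp
        have hmid : (arr'.drop (J - k')).take k' = (arr.drop (J - k')).take k' := by
          rw [harr', List.drop_append_of_le_length (by simp [List.length_take]; omega)]
          rw [List.drop_take]
          have h1 : ((arr.drop (J - k')).take (J - (J - k'))).length = k' := by
            simp [List.length_take, List.length_drop]
            omega
          rw [List.take_append_of_le_length (by omega)]
          rw [List.take_take]
          congr 1
          omega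
        have hmid2 : (arr.drop (J - (k' + 1 - 1))).take (k' + 1)
            = (arr.drop (J - k')).take k' ++ [arr[J]] := by
          have : J - (k' + 1 - 1) = J - k' := by omega
          rw [this, List.take_add_one]
          have hidx : (arr.drop (J - k'))[k']? = some arr[J] := by
            rw [List.getElem?_drop]
            have : J - k' + k' = J := by omega
            rw [this, List.getElem?_eq_getElem hJlen]
          rw [hidx]
          rfl
        rw [htk, hdrJ, hmid]
        have hJ1 : J + 1 - (k' + 1) = J - k' := by omega
        rw [hJ1]
        have : (arr.drop (J - (k' + 1 - 1))).take (k' + 1) = (arr.drop (J - k')).take k' ++ [arr[J]] := hmid2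
        rw [show J + 1 - (k' + 1) = J - k' from by omega] at *
        have goal2 : ((arr.drop (J - k')).take (k' + 1)).map f
            = ((arr.drop (J - k')).take k').map f ++ [f arr[J]] := by
          have h3 : (arr.drop (J - k')).take (k' + 1) = (arr.drop (J - k')).take k' ++ [arr[J]] := by
            have h4 : J - (k' + 1 - 1) = J - k' := by omega
            rw [← h4]; exact hmid2
          rw [h3, List.map_append]
          rfl
        rw [goal2]
        simp [List.append_assoc]

theorem find_optimal_distribution_spec_main (total : Int) (dl : List Int) :
    find_optimal_distribution total dl = find_optimal_distribution_alt total dl := by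
  have hs : (PySem.List.sorted dl (fun x => x) false).Pairwise (· ≤ ·) :=
    PySem.List.sorted_pairwise dl (fun x => x)
  simp only [find_optimal_distribution, find_optimal_distribution_alt, PySem.List.len_eq,
    List.map_id']
  generalize hsg : PySem.List.sorted dl (fun x => x) false = s at hs ⊢
  set T := pvBsA s total 0 2000000000 with hTdef
  set rem : Int := total - pvNeedA s T with hremdef
  set arr := s.map (fun x => min x T) with harrdef
  set J := s.length with hJdef
  set k := min J rem.toNat with hkdef
  have hneed : ∀ m : Int, pvNeedB s (0 :: pvPsums 0 s) (J : Int) m = pvNeedA s m :=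
    fun m => pvNeed_eq s hs m
  -- A side: first loop
  have h1 : (PySem.List.pyRange 0 (J : Int) 1).foldl (pvStep1 T) (total, s) = (rem, arr) := by
    have := pvLoop1_spec T s [] total
    simpa using this
  rw [h1]
  have harrlen : arr.length = J := by rw [harrdef, List.length_map, hJdef]
  rw [show ((rem, arr).2.length : Int) = ((J : Int)) from by rw [harrlen]]
  have h2 := pvLoop2_spec J arr rem (by omega)
  rw [show (rem, arr).2 = arr from rfl, show (rem, arr).1 = rem from rfl, h2, ← hkdef]
  rw [show List.drop J arr = ([] : List Int) from List.drop_eq_nil_of_le (le_of_eq harrlen), List.append_nil]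
  have hmid : (arr.drop (J - k)).take k = arr.drop (J - k) := by
    apply List.take_of_length_le
    rw [List.length_drop, harrlen]
    omega
  rw [hmid, List.map_append, List.sum_append]
  -- B side
  have hpre : (s.foldl (fun (st : List Int × Int) v => (st.1 ++ [st.2 + v], st.2 + v)) ([0], 0)).1
      = 0 :: pvPsums 0 s := by
    rw [pvPre_fold s [0] 0]
    rfl
  rw [hpre]
  have hTeq : pvBsB s (0 :: pvPsums 0 s) (J : Int) total 0 2000000000 = T := by
    rw [hTdef]
    exact (pvBs_eq s (0 :: pvPsums 0 s) (J : Int) total hneed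
      ((2000000000 - 0 : Int)).toNat 0 2000000000 (le_refl _)).symm
  rw [hTeq, hneed T, ← hremdef]
  have hkint : min ((J : Nat) : Int) (max 0 rem) = ((k : Nat) : Int) := by omega
  rw [hkint]
  have hnk : ((J : Int) - (k : Int)) = ((J - k : Nat) : Int) := by
    have : k ≤ J := by omega
    omega
  rw [hnk]
  rw [PySem.List.slice_to s (by omega), PySem.List.slice_from s (by omega)]
  rw [Int.toNat_natCast]
  show (List.map (fun x => x * x) (List.take (J - k) arr)).sum
      + (List.map (fun x => x * x) (List.map (fun x => max 0 (x - 1)) (List.drop (J - k) arr))).sum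
    = (List.map (fun x => min x T ^ 2) (List.take (J - k) s)).sum
      + (List.map (fun x => max 0 (min x T - 1) ^ 2) (List.drop (J - k) s)).sum
  rw [harrdef, ← List.map_take, ← List.map_drop, List.map_map, List.map_map, List.map_map]
  congr 1
  · congr 1
    apply List.map_congr_left
    intro x _
    simp [pow_two]
  · congr 1
    apply List.map_congr_left
    intro x _
    simp [pow_two]

-- ===== VERDICT (by name: the statement is the Claim_ definition above) =====
theorem find_optimal_distribution_spec : Claim_equal_find_optimal_distribution := by
  intro total_supply demand_list _
  exact find_optimal_distribution_spec_main total_supply demand_list
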